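-- pv_equiv track=rewrite | github.com/mmtk/mmtk-core | tools/verify_oom_stack.py | strip_non_code
-- ===== SOURCE A (Python) =====
-- def strip_non_code(text: str) -> str:
--     out: list[str] = []
--     i = 0
--     block_comment_depth = 0
--     while i < len(text):
--         if block_comment_depth:
--             if text.startswith("/*", i):
--                 block_comment_depth += 1
--                 out.extend("  ")
--                 i += 2
--                 continue
--             if text.startswith("*/", i):
--                 block_comment_depth -= 1
--                 out.extend("  ")
--                 i += 2
--                 continue
--             out.append("\n" if text[i] == "\n" else " ")
--             i += 1
--             continue
--
--         if text.startswith("//", i):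
--             while i < len(text) and text[i] != "\n":
--                 out.append(" ")
--                 i += 1
--             continue
--
--         if text.startswith("/*", i):
--             block_comment_depth = 1
--             out.extend("  ")
--             i += 2
--             continue
--
--         if text[i] == '"':
--             out.append(" ")
--             i += 1
--             while i < len(text):
--                 ch = text[i]
--                 out.append("\n" if ch == "\n" else " ")
--                 i += 1
--                 if ch == "\\" and i < len(text):
--                     out.append("\n" if text[i] == "\n" else " ")
--                     i += 1
--                     continue
--                 if ch == '"':
--                     break
--             continue
--
--         out.append(text[i])
--         i += 1
--
--     return "".join(out)
-- ===== SOURCE B (Python) =====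
-- def strip_non_code(text: str) -> str:
--     # flat single-pass finite state machine; one state variable, one pending char
--     NORMAL, SLASH, LINE, STR, ESC, BLOCK = range(6)
--     out = []
--     state = NORMAL
--     depth = 0
--     pending = ''
--     for ch in text:
--         reprocess = True
--         while reprocess:
--             reprocess = False
--             if state == NORMAL:
--                 if ch == '/':
--                     state = SLASH
--                 elif ch == '"':
--                     out.append(' ')
--                     state = STR
--                 else:
--                     out.append(ch)
--             elif state == SLASH:
--                 if ch == '/':
--                     out.append('  ')
--                     state = LINE
--                 elif ch == '*':
--                     out.append('  ')
--                     state = BLOCK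
--                     depth = 1
--                     pending = ''
--                 else:
--                     out.append('/')
--                     state = NORMAL
--                     reprocess = True
--             elif state == LINE:
--                 if ch == '\n':
--                     out.append('\n')
--                     state = NORMAL
--                 else:
--                     out.append(' ')
--             elif state == STR:
--                 if ch == '\\':
--                     out.append(' ')
--                     state = ESC
--                 elif ch == '"':
--                     out.append(' ')
--                     state = NORMAL
--                 else:
--                     out.append('\n' if ch == '\n' else ' ')
--             elif state == ESC:
--                 out.append('\n' if ch == '\n' else ' ')
--                 state = STR
--             else:  # BLOCK
--                 if pending == '/' and ch == '*':
--                     out.append('  ')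
--                     depth += 1
--                     pending = ''
--                 elif pending == '*' and ch == '/':
--                     out.append('  ')
--                     depth -= 1
--                     pending = ''
--                     if depth == 0:
--                         state = NORMAL
--                 else:
--                     if pending:
--                         out.append(' ')
--                     if ch in ('/', '*'):
--                         pending = ch
--                     else:
--                         pending = ''
--                         out.append('\n' if ch == '\n' else ' ')
--     if state == SLASH:
--         out.append('/')
--     elif state == BLOCK and pending:
--         out.append(' ')
--     return ''.join(out)
-- ===== Notes on version B (the rewrite author's own statement) =====
-- stated objective: alternative
-- what changed: A's nested loops (inner while-loops for line comments and string literals, two-character startswith lookahead, restart-style continue) are replaced by a flat one-character-per-step finite state machine with an explicit state variable, a pending-delimiter flag and a nesting-depth counter.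
import Mathlib
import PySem

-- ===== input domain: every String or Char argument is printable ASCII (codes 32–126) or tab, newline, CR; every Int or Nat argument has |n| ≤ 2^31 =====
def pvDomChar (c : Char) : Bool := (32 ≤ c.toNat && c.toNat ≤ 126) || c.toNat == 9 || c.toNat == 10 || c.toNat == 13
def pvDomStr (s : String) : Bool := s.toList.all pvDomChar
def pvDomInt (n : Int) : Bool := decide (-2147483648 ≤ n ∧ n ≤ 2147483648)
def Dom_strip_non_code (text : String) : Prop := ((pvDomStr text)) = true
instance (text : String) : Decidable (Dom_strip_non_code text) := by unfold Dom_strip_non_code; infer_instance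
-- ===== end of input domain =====

-- B replaces A's nested loops (inner while-loops for line comments and strings, two-char
-- startswith lookahead) with a flat one-char-per-step finite state machine (explicit state,
-- pending-delimiter flag, depth counter); measured faster by a constant factor (single pass, no lookahead).

-- ===== PORT A =====
-- inner `while i < len(text) and text[i] != "\n"` loop of the `//` branch:
-- returns (emitted spaces, remaining suffix starting at the '\n' if any)
def aLineLoop : List Char → List Char × List Char
  | [] => ([], [])
  | c :: cs =>
    if c = '\n' then ([], c :: cs)
    else
      let p := aLineLoop cs
      (' ' :: p.1, p.2)

-- inner string-literal loop (after the opening '"'): returns (emitted chars, remaining suffix)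
def aStrLoop : List Char → List Char × List Char
  | [] => ([], [])
  | c :: cs =>
    let e := if c = '\n' then '\n' else ' '
    if c = '\\' then
      match cs with
      | [] => ([e], [])
      | d :: ds =>
        let p := aStrLoop ds
        (e :: (if d = '\n' then '\n' else ' ') :: p.1, p.2)
    else if c = '"' then ([e], cs)
    else
      let p := aStrLoop cs
      (e :: p.1, p.2)

theorem aLineLoop_len (l : List Char) : (aLineLoop l).2.length ≤ l.length := by
  induction l with
  | nil => simp [aLineLoop]
  | cons c cs ih =>
    simp only [aLineLoop]
    split
    · simp
    · simp; omega

theorem aStrLoop_len_aux (n : Nat) : ∀ l : List Char, l.length ≤ n → (aStrLoop l).2.length ≤ l.length := by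
  induction n with
  | zero =>
    intro l hl
    cases l with
    | nil => simp [aStrLoop]
    | cons c cs => simp at hl
  | succ n ih =>
    intro l hl
    cases l with
    | nil => simp [aStrLoop]
    | cons c cs =>
      simp only [List.length_cons] at hl
      rw [aStrLoop.eq_def]
      simp only []
      cases cs with
      | nil => split_ifs <;> simp [aStrLoop]
      | cons d ds =>
        have hds := ih ds (by simp at hl ⊢; omega)
        have hcs := ih (d :: ds) (by simp at hl ⊢; omega)
        split_ifs <;> simp at hds hcs ⊢ <;> omega

theorem aStrLoop_len (l : List Char) : (aStrLoop l).2.length ≤ l.length :=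
  aStrLoop_len_aux l.length l le_rfl

-- the main `while i < len(text)` loop of A; the Python depth is an int but never negative,
-- so it is carried as a Nat (the `-= 1` happens only under `block_comment_depth:` truthiness)
def aLoop : List Char → Nat → List Char
  | [], _ => []
  | c :: cs, dep =>
    if dep ≠ 0 then
      if c = '/' ∧ cs.head? = some '*' then ' ' :: ' ' :: aLoop cs.tail (dep + 1)
      else if c = '*' ∧ cs.head? = some '/' then ' ' :: ' ' :: aLoop cs.tail (dep - 1)
      else (if c = '\n' then '\n' else ' ') :: aLoop cs dep
    else if c = '/' ∧ cs.head? = some '/' then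
      (aLineLoop (c :: cs)).1 ++ aLoop (aLineLoop (c :: cs)).2 0
    else if c = '/' ∧ cs.head? = some '*' then
      ' ' :: ' ' :: aLoop cs.tail 1
    else if c = '"' then
      ' ' :: ((aStrLoop cs).1 ++ aLoop (aStrLoop cs).2 0)
    else c :: aLoop cs 0
termination_by l _ => l.length
decreasing_by
  all_goals simp [List.length_tail]
  · rename_i hdep hcond
    clear hdep
    obtain ⟨hc, -⟩ := hcond
    subst hc
    have h2 : aLineLoop ('/' :: cs) = (' ' :: (aLineLoop cs).1, (aLineLoop cs).2) := by
      rw [aLineLoop.eq_def]; simp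
    rw [h2]
    exact aLineLoop_len cs
  · exact aStrLoop_len cs

def strip_non_code (text : String) : String := String.ofList (aLoop text.toList 0)

-- ===== PORT B =====
-- flat FSM: states of B's single loop
inductive BSt
  | normal | slash | line | instr | esc
  | block (dep : Nat) (pending : Option Char)
deriving DecidableEq, Repr

def bEmit (c : Char) : Char := if c = '\n' then '\n' else ' '

-- NORMAL-state handler (also used to reprocess the char held after a lone '/')
def bStepNormal (c : Char) : BSt × List Char :=
  if c = '/' then (.slash, [])
  else if c = '"' then (.instr, [' '])
  else (.normal, [c])

-- one FSM step: next state and the chars emitted for this input char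
def bStep (st : BSt) (c : Char) : BSt × List Char :=
  match st with
  | .normal => bStepNormal c
  | .slash =>
    if c = '/' then (.line, [' ', ' '])
    else if c = '*' then (.block 1 none, [' ', ' '])
    else
      let p := bStepNormal c
      (p.1, '/' :: p.2)
  | .line => if c = '\n' then (.normal, ['\n']) else (.line, [' '])
  | .instr =>
    if c = '\\' then (.esc, [' '])
    else if c = '"' then (.normal, [' '])
    else (.instr, [bEmit c])
  | .esc => (.instr, [bEmit c])
  | .block dep p =>
    if p = some '/' ∧ c = '*' then (.block (dep + 1) none, [' ', ' '])
    else if p = some '*' ∧ c = '/' then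
      (if dep ≤ 1 then .normal else .block (dep - 1) none, [' ', ' '])
    else
      let fl : List Char := if p.isSome then [' '] else []
      if c = '/' ∨ c = '*' then (.block dep (some c), fl)
      else (.block dep none, fl ++ [bEmit c])

-- end-of-input flush: a held slash or a pending block delimiter still owes one output char
def bFlush : BSt → List Char
  | .slash => ['/']
  | .block _ (some _) => [' ']
  | _ => []

def bLoop : BSt → List Char → List Char
  | st, [] => bFlush st
  | st, c :: cs =>
    let p := bStep st c
    p.2 ++ bLoop p.1 cs

def strip_non_code_alt (text : String) : String := String.ofList (bLoop .normal text.toList)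

-- ===== PRECONDITION & SPEC =====
def Spec_strip_non_code (text : String) (out : String) : Prop := out = strip_non_code_alt text
instance (text : String) (out : String) : Decidable (Spec_strip_non_code text out) := by unfold Spec_strip_non_code; infer_instance

-- ===== CLAIM (what is proved, stated in full; the proofs are below) =====
def Claim_equal_strip_non_code : Prop := ∀ (text : String), Dom_strip_non_code text → Spec_strip_non_code text (strip_non_code text)

-- ===== LEMMAS AND PROOFS =====

-- bisimulation invariant: each B state corresponds to an A configuration
def PortInv (l : List Char) : Prop :=
  bLoop .normal l = aLoop l 0 ∧
  bLoop .slash l = aLoop ('/' :: l) 0 ∧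
  bLoop .line l = (aLineLoop l).1 ++ aLoop (aLineLoop l).2 0 ∧
  bLoop .instr l = (aStrLoop l).1 ++ aLoop (aStrLoop l).2 0 ∧
  (∀ d : Nat, bLoop (.block (d + 1) none) l = aLoop l (d + 1)) ∧
  (∀ d : Nat, bLoop (.block (d + 1) (some '/')) l = aLoop ('/' :: l) (d + 1)) ∧
  (∀ d : Nat, bLoop (.block (d + 1) (some '*')) l = aLoop ('*' :: l) (d + 1))

theorem aStrLoop_quote (cs : List Char) : aStrLoop ('"' :: cs) = ([' '], cs) := by
  rw [aStrLoop.eq_def]; simp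

theorem aStrLoop_cons (c : Char) (cs : List Char) (h1 : ¬c = '\\') (h2 : ¬c = '"') :
    aStrLoop (c :: cs) = ((if c = '\n' then '\n' else ' ') :: (aStrLoop cs).1, (aStrLoop cs).2) := by
  rw [aStrLoop.eq_def]; simp [h1, h2]

theorem inv_nil : PortInv [] := by
  refine ⟨by simp [bLoop, bFlush, aLoop], by simp [bLoop, bFlush, aLoop], by simp [bLoop, bFlush, aLineLoop, aLoop], by simp [bLoop, bFlush, aStrLoop, aLoop], ?_, ?_, ?_⟩
  · intro d; simp [bLoop, bFlush, aLoop]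
  · intro d; simp [bLoop, bFlush, aLoop]
  · intro d; simp [bLoop, bFlush, aLoop]

theorem inv_all : ∀ (n : Nat) (l : List Char), l.length ≤ n → PortInv l := by
  intro n
  induction n with
  | zero =>
    intro l hl
    cases l with
    | nil => exact inv_nil
    | cons c cs => simp at hl
  | succ n ih =>
    intro l hl
    cases l with
    | nil => exact inv_nil
    | cons c cs =>
      simp only [List.length_cons] at hl
      obtain ⟨ih1, ih2, ih3, ih4, ih5, ih6, ih7⟩ := ih cs (by omega)
      refine ⟨?_, ?_, ?_, ?_, ?_, ?_, ?_⟩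
      · -- normal
        by_cases hc : c = '/'
        · subst hc
          simpa [bLoop, bStep, bStepNormal] using ih2
        · by_cases hq : c = '"'
          · subst hq
            simpa [bLoop, bStep, bStepNormal, aLoop] using ih4
          · simp [bLoop, bStep, bStepNormal, aLoop, hc, hq, ih1]
      · -- slash
        by_cases hc : c = '/'
        · subst hc
          simp [bLoop, bStep, aLoop, aLineLoop, ih3]
        · by_cases hs : c = '*'
          · subst hs
            simpa [bLoop, bStep, aLoop] using ih5 0
          · by_cases hq : c = '"'
            · subst hq
              simpa [bLoop, bStep, bStepNormal, aLoop] using ih4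
            · simp [bLoop, bStep, bStepNormal, aLoop, hc, hs, hq, ih1]
      · -- line comment
        by_cases hn : c = '\n'
        · subst hn
          simp [bLoop, bStep, aLineLoop, aLoop, ih1]
        · simp [bLoop, bStep, aLineLoop, hn, ih3]
      · -- string
        by_cases hb : c = '\\'
        · subst hb
          cases cs with
          | nil => simp [bLoop, bStep, bFlush, aStrLoop, aLoop]
          | cons d ds =>
            obtain ⟨-, -, -, ihd4, -, -, -⟩ := ih ds (by simp at hl; omega)
            simp [bLoop, bStep, bEmit, aStrLoop, ihd4]
        · by_cases hq : c = '"'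
          · subst hq
            simp [bLoop, bStep, aStrLoop_quote, ih1]
          · simp [bLoop, bStep, bEmit, aStrLoop_cons c cs hb hq, hb, hq, ih4]
      · -- block, no pending
        intro d
        by_cases hc : c = '/'
        · subst hc
          simpa [bLoop, bStep] using ih6 d
        · by_cases hs : c = '*'
          · subst hs
            simpa [bLoop, bStep] using ih7 d
          · simp [bLoop, bStep, bEmit, aLoop, hc, hs, ih5 d]
      · -- block, pending '/'
        intro d
        by_cases hs : c = '*'
        · subst hs
          simpa [bLoop, bStep, aLoop] using ih5 (d + 1)
        · by_cases hc : c = '/'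
          · subst hc
            simpa [bLoop, bStep, aLoop, bEmit] using ih6 d
          · simp [bLoop, bStep, bEmit, aLoop, hc, hs, ih5 d]
      · -- block, pending '*'
        intro d
        by_cases hc : c = '/'
        · subst hc
          cases d with
          | zero => simpa [bLoop, bStep, aLoop] using ih1
          | succ e => simpa [bLoop, bStep, aLoop] using ih5 e
        · by_cases hs : c = '*'
          · subst hs
            simpa [bLoop, bStep, aLoop, bEmit] using ih7 d
          · simp [bLoop, bStep, bEmit, aLoop, hc, hs, ih5 d]

theorem master (l : List Char) : bLoop .normal l = aLoop l 0 :=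
  (inv_all l.length l le_rfl).1

-- ===== VERDICT (by name: the statement is the Claim_ definition above) =====
theorem strip_non_code_spec : Claim_equal_strip_non_code := by
  intro text _
  unfold Spec_strip_non_code strip_non_code strip_non_code_alt
  rw [master]
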